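-- pv_equiv track=rewrite | github.com/emcdunna/TotalWarModding_TableHelper | Python/generate_garrisons.py | read_tsv
-- ===== SOURCE A (Python) =====
-- def read_tsv(line):
--     word = ""
--     lst = []
--     for i in line:
--         if i == "\t":
--             lst.append(word)
--             word = ""
--         elif i == "\n":
--             if len(word)>0:
--                 lst.append(word)
--             return lst
--         else:
--             word += i
--     return lst
-- ===== SOURCE B (Python) =====
-- def read_tsv(line):
--     if '\n' in line:
--         head = line[:line.index('\n')]
--         parts = head.split('\t')
--         return parts if parts[-1] else parts[:-1]
--     return line.split('\t')[:-1]
-- ===== Notes on version B (the rewrite author's own statement) =====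
-- stated objective: faster
-- what changed: Replaced the char-by-char accumulator loop with head extraction (text before the first newline), a library split on tab, and explicit trimming of the last field (kept only when a newline terminated the line and the field is nonempty).
import Mathlib
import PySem

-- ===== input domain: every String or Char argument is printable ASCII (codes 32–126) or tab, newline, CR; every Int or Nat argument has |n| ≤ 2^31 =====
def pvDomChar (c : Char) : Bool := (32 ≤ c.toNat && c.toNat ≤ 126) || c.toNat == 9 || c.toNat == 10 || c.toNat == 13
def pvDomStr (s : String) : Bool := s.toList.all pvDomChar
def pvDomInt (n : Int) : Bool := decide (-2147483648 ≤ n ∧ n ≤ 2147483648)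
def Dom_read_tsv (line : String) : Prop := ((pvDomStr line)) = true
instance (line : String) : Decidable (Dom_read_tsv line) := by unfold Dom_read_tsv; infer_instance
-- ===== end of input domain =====

-- B replaces A's char-by-char accumulator loop with head-extraction + library split on tab +
-- trim of the last field; same return value everywhere (measured faster by a constant factor).

-- ===== PORT A =====
-- the for-loop of A: state = (current word, list so far); returning at '\n' is the non-recursive branch
def readTsvLoop (l : List Char) (word : List Char) (lst : List (List Char)) : List (List Char) :=
  match l with
  | [] => lst
  | c :: rest =>
    if c = '\t' then readTsvLoop rest [] (lst ++ [word])
    else if c = '\n' then (if word.length > 0 then lst ++ [word] else lst)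
    else readTsvLoop rest (word ++ [c]) lst

def read_tsv (line : String) : List String :=
  (readTsvLoop line.toList [] []).map String.ofList

-- ===== PORT B =====
def read_tsv_alt (line : String) : List String :=
  let t := line.toList
  if PySem.Chars.isIn ['\n'] t then
    -- head = line[:line.index('\n')]; index is guarded by the 'in' test, so find is ≥ 0 here
    let head := PySem.List.slice t none (some (PySem.Chars.find t ['\n']))
    let parts := PySem.Chars.splitOn head ['\t']
    -- parts[-1] (split never returns an empty list, so the .getD default is never used)
    if ((PySem.List.pyGet? parts (-1)).getD []).isEmpty then
      (PySem.List.slice parts none (some (-1))).map String.ofList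
    else parts.map String.ofList
  else
    ((PySem.List.slice (PySem.Chars.splitOn t ['\t']) none (some (-1))).map String.ofList)

-- ===== PRECONDITION & SPEC =====
def Spec_read_tsv (line : String) (out : List String) : Prop := out = read_tsv_alt line
instance (line : String) (out : List String) : Decidable (Spec_read_tsv line out) := by unfold Spec_read_tsv; infer_instance

-- ===== CLAIM (what is proved, stated in full; the proofs are below) =====
def Claim_equal_read_tsv : Prop := ∀ (line : String), Dom_read_tsv line → Spec_read_tsv line (read_tsv line)

-- ===== LEMMAS AND PROOFS =====

-- splitting on '\t', structurally
def splitTab : List Char → List (List Char)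
  | [] => [[]]
  | c :: rest => if c = '\t' then [] :: splitTab rest else (splitTab rest).modifyHead (c :: ·)

theorem splitTab_ne_nil (l : List Char) : splitTab l ≠ [] := by
  cases l with
  | nil => simp [splitTab]
  | cons c rest =>
    simp only [splitTab]
    split_ifs
    · simp
    · cases h : splitTab rest with
      | nil => exact absurd h (splitTab_ne_nil rest)
      | cons p ps => simp [h]

theorem splitOn_go_eq (l : List Char) : ∀ (fuel : Nat) (cur : List Char) (acc : List (List Char)),
    l.length ≤ fuel →
    PySem.Chars.splitOn.go ['\t'] fuel l cur acc
      = acc.reverse ++ (splitTab l).modifyHead (cur.reverse ++ ·) := by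
  induction l with
  | nil =>
    intro fuel cur acc _
    cases fuel <;> simp [PySem.Chars.splitOn.go, splitTab]
  | cons c rest ih =>
    intro fuel cur acc hf
    cases fuel with
    | zero => simp at hf
    | succ f =>
      simp only [PySem.Chars.splitOn.go]
      by_cases hc : c = '\t'
      · subst hc
        rw [if_pos (by simp [List.isPrefixOf])]
        simp only [List.length_cons, List.length_nil, List.drop_succ_cons, List.drop_zero]
        rw [ih f [] _ (by simpa using Nat.le_of_succ_le_succ hf)]
        simp only [splitTab, if_pos rfl, List.reverse_cons, List.reverse_nil, List.nil_append,
          List.modifyHead, List.append_assoc, List.singleton_append]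
        cases h : splitTab rest <;> simp [h]
      · rw [if_neg (by simp [List.isPrefixOf]; exact fun h => hc h.symm)]
        rw [ih f (c :: cur) acc (Nat.le_of_succ_le_succ hf)]
        simp only [splitTab, if_neg hc]
        cases h : splitTab rest with
        | nil => exact absurd h (splitTab_ne_nil rest)
        | cons p ps => simp [h]

theorem splitOn_tab (l : List Char) : PySem.Chars.splitOn l ['\t'] = splitTab l := by
  rw [PySem.Chars.splitOn, splitOn_go_eq l (l.length + 1) [] [] (by omega)]
  cases h : splitTab l with
  | nil => exact absurd h (splitTab_ne_nil l)
  | cons p ps => simp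

-- A's loop with lst factored out
def core (word : List Char) : List Char → List (List Char)
  | [] => []
  | c :: rest =>
    if c = '\t' then word :: core [] rest
    else if c = '\n' then (if word.length > 0 then [word] else [])
    else core (word ++ [c]) rest

theorem loop_eq (l : List Char) : ∀ (word : List Char) (lst : List (List Char)),
    readTsvLoop l word lst = lst ++ core word l := by
  induction l with
  | nil => intro word lst; simp [readTsvLoop, core]
  | cons c rest ih =>
    intro word lst
    simp only [readTsvLoop, core]
    split_ifs with h1 h2 h3 <;> simp [ih]

-- B's branch structure, over splitTab/takeWhile
def coreB (word : List Char) (l : List Char) : List (List Char) :=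
  let parts := (splitTab (l.takeWhile (fun c => c ≠ '\n'))).modifyHead (word ++ ·)
  if '\n' ∈ l then (if parts.getLast?.getD [] = [] then parts.dropLast else parts)
  else parts.dropLast

theorem splitTab_cons (l : List Char) :
    ∃ p ps, splitTab l = p :: ps := by
  cases h : splitTab l with
  | nil => exact absurd h (splitTab_ne_nil l)
  | cons p ps => exact ⟨p, ps, rfl⟩

theorem coreB_tab (word : List Char) (rest : List Char) :
    coreB word ('\t' :: rest) = word :: coreB [] rest := by
  obtain ⟨p, ps, hsp⟩ := splitTab_cons (rest.takeWhile (fun c => c ≠ '\n'))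
  simp only [coreB, List.takeWhile_cons, decide_eq_true_eq,
    if_pos (by decide : ('\t' : Char) ≠ '\n'), splitTab, if_pos rfl, hsp,
    List.modifyHead, List.nil_append, List.mem_cons,
    show ('\n' = '\t') = False by simp, false_or]
  by_cases hm : '\n' ∈ rest
  · rw [if_pos hm, if_pos hm]
    cases ps with
    | nil => simp [apply_ite (word :: ·)]
    | cons q qs => simp [apply_ite (word :: ·)]
  · rw [if_neg hm, if_neg hm]
    simp

theorem coreB_nl (word : List Char) (rest : List Char) :
    coreB word ('\n' :: rest) = if word.length > 0 then [word] else [] := by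
  simp only [coreB, List.takeWhile_cons, decide_eq_true_eq, if_neg (by simp : ¬('\n' : Char) ≠ '\n'),
    splitTab, List.modifyHead, List.append_nil, List.mem_cons, true_or, if_pos]
  rcases word with _ | ⟨w, ws⟩ <;> simp

theorem coreB_other (word : List Char) (c : Char) (rest : List Char)
    (hc : c ≠ '\t') (hn : c ≠ '\n') :
    coreB word (c :: rest) = coreB (word ++ [c]) rest := by
  obtain ⟨p, ps, hsp⟩ := splitTab_cons (rest.takeWhile (fun c => c ≠ '\n'))
  simp only [coreB, List.takeWhile_cons, decide_eq_true_eq, if_pos hn,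
    splitTab, if_neg hc, hsp, List.modifyHead, List.mem_cons,
    show ('\n' = c) = False by simp [Ne.symm hn], false_or, List.append_assoc,
    List.cons_append, List.nil_append]

theorem core_eq_coreB (l : List Char) : ∀ (word : List Char), core word l = coreB word l := by
  induction l with
  | nil => intro word; simp [core, coreB, splitTab]
  | cons c rest ih =>
    intro word
    by_cases hc : c = '\t'
    · subst hc; rw [coreB_tab]; simp [core, ih]
    · by_cases hn : c = '\n'
      · subst hn; rw [coreB_nl]; simp [core]
      · rw [coreB_other word c rest hc hn]
        simp only [core, if_neg hc, if_neg hn, ih]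

theorem singleton_infix_iff (a : Char) (l : List Char) : [a] <:+: l ↔ a ∈ l := by
  constructor
  · intro h; exact h.subset (by simp)
  · intro h
    obtain ⟨s, t, rfl⟩ := List.append_of_mem h
    exact ⟨s, t, by simp⟩

theorem take_of_first_occ (t : List Char) : ∀ (k : Nat),
    (['\n'] <+: t.drop k) → (∀ i, i < k → ¬ (['\n'] <+: t.drop i)) →
    t.take k = t.takeWhile (fun c => c ≠ '\n') := by
  induction t with
  | nil => intro k hpre _; simp at hpre
  | cons c rest ih =>
    intro k hpre hmin
    cases k with
    | zero =>
      have : c = '\n' := by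
        obtain ⟨u, hu⟩ := (by simpa using hpre : ['\n'] <+: c :: rest)
        exact (List.cons_eq_cons.mp hu).1.symm
      simp [List.takeWhile_cons, this]
    | succ k' =>
      have hc : c ≠ '\n' := by
        intro h
        exact hmin 0 (by omega) (by simp [h])
      rw [List.take_succ_cons, List.takeWhile_cons, if_pos (by simpa using hc)]
      congr 1
      refine ih k' (by simpa using hpre) ?_
      intro i hi hin
      exact hmin (i + 1) (by omega) (by simpa using hin)

theorem pyGet?_neg_one (xs : List (List Char)) : PySem.List.pyGet? xs (-1) = xs.getLast? := by
  simp only [PySem.List.pyGet?, PySem.List.pyIdx?]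
  cases xs with
  | nil => simp
  | cons x l =>
    rw [if_neg (by simp), if_pos (by simp), List.getLast?_eq_getElem?]
    congr 1

theorem takeWhile_of_not_mem (t : List Char) (h : '\n' ∉ t) :
    t.takeWhile (fun c => c ≠ '\n') = t := by
  induction t with
  | nil => rfl
  | cons c rest ih =>
    simp only [List.mem_cons, not_or] at h
    rw [List.takeWhile_cons, if_pos (by simpa using Ne.symm h.1), ih h.2]

theorem modifyHead_nil_append (xs : List (List Char)) :
    xs.modifyHead ((([] : List Char)) ++ ·) = xs := by
  cases xs <;> simp

-- ===== VERDICT (by name: the statement is the Claim_ definition above) =====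
theorem read_tsv_spec : Claim_equal_read_tsv := by
  intro line _
  unfold Spec_read_tsv read_tsv read_tsv_alt
  set t := line.toList with ht
  rw [loop_eq t [] [], List.nil_append, core_eq_coreB]
  by_cases hm : '\n' ∈ t
  · rw [if_pos (by rw [PySem.Chars.isIn_iff_infix]; exact (singleton_infix_iff _ _).mpr hm)]
    have hnn : 0 ≤ PySem.Chars.find t ['\n'] :=
      (PySem.Chars.find_nonneg_iff _ _).mpr ((singleton_infix_iff _ _).mpr hm)
    obtain ⟨hpre, hmin⟩ := PySem.Chars.find_spec hnn
    simp only [PySem.List.slice_to t hnn,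
      take_of_first_occ t (PySem.Chars.find t ['\n']).toNat hpre hmin, splitOn_tab,
      pyGet?_neg_one, PySem.List.slice_to_neg_one]
    unfold coreB
    rw [if_pos hm, modifyHead_nil_append]
    rcases h : (splitTab (t.takeWhile (fun c => c ≠ '\n'))).getLast?.getD [] with _ | ⟨x, xs⟩
    · simp [h]
    · simp [h]
  · have hfalse : PySem.Chars.isIn ['\n'] t = false := by
      rw [PySem.Chars.isIn_eq_false_iff]
      exact fun hinf => hm ((singleton_infix_iff _ _).mp hinf)
    rw [if_neg (by simp [hfalse])]
    simp only [splitOn_tab, PySem.List.slice_to_neg_one]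
    unfold coreB
    rw [if_neg hm, modifyHead_nil_append, takeWhile_of_not_mem t hm]
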